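-- pv_equiv track=rewrite | github.com/Maj1n777/dependency-visualizer | dependency_analyzer.py | dfs_load_order
-- ===== SOURCE A (Python) =====
-- from typing import Dict, List, Set, Tuple
--
-- def dfs_load_order(graph: Dict[str, List[str]], start_package: str) -> List[str]:
--     visited = set()
--     load_order = []
--
--     def dfs(package):
--         if package in visited:
--             return
--         visited.add(package)
--
--         for dep in graph.get(package, []):
--             dfs(dep)
--
--         load_order.append(package)
--
--     dfs(start_package)
--     return load_order
-- ===== SOURCE B (Python) =====
-- def dfs_load_order(graph, start_package):
--     visited = set()
--     load_order = []
--     stack = [(start_package, False)]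
--     while stack:
--         node, expanded = stack.pop()
--         if expanded:
--             load_order.append(node)
--         elif node not in visited:
--             visited.add(node)
--             stack.append((node, True))
--             for child in reversed(graph.get(node, [])):
--                 stack.append((child, False))
--     return load_order
-- ===== Notes on version B (the rewrite author's own statement) =====
-- stated objective: alternative
-- what changed: Replaces the recursive closure-based DFS with an iterative explicit stack of (node, expanded) frames that produces the identical post-order load order.
import Mathlib
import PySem

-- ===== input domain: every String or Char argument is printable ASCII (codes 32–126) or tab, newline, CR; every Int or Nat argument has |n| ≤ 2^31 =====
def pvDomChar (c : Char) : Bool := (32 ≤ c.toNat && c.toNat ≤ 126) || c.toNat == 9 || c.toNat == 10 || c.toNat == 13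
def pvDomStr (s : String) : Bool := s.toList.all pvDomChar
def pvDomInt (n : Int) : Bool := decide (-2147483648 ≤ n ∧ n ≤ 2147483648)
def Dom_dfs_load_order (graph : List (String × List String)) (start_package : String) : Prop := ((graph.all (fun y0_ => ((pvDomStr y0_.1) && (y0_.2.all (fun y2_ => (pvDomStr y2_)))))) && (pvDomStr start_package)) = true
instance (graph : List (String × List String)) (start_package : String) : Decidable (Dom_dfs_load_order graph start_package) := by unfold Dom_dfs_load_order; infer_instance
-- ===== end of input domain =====

-- B replaces A's recursive closure DFS by an iterative explicit stack of (node, expanded) frames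
-- producing the identical post-order (objective: alternative decomposition, same complexity).
-- Both ports carry a fuel guard (consumed once per newly visited node) proven never to run out.

-- graph.get(p, []) — first-match association-list lookup, Python dict semantics
def pvChildren (graph : List (String × List String)) (p : String) : List String :=
  (PySem.Dict.mk graph).getD p []

-- fuel: strictly more than the number of distinct packages ever visitable
def pvFuel (graph : List (String × List String)) : Nat :=
  (graph.flatMap (fun kv => kv.2)).length + 2

-- ===== PORT A =====
-- A's recursive dfs; fuel is threaded through and decremented exactly when a new node is
-- marked visited (a pure guard; 'min' keeps the recursion structurally decreasing and is
-- the identity on every run, as proved below). Returns (remaining fuel, visited, load_order).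
mutual
def pvDfsA (graph : List (String × List String)) (n : Nat) (vis : PySem.Set String)
    (ord : List String) (p : String) : Option (Nat × PySem.Set String × List String) :=
  if PySem.Set.contains vis p then some (n, vis, ord)
  else
    match n with
    | 0 => none
    | Nat.succ m =>
      match pvDfsAL graph m (PySem.Set.add vis p) ord (pvChildren graph p) with
      | none => none
      | some (n', v, o) => some (n', v, o ++ [p])
termination_by (n, 0)
decreasing_by
  exact Prod.Lex.left _ _ (Nat.lt_succ_self _)
def pvDfsAL (graph : List (String × List String)) (n : Nat) (vis : PySem.Set String)
    (ord : List String) (ds : List String) : Option (Nat × PySem.Set String × List String) :=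
  match ds with
  | [] => some (n, vis, ord)
  | d :: ds' =>
    match pvDfsA graph n vis ord d with
    | none => none
    | some (n₁, v, o) => pvDfsAL graph (min n₁ n) v o ds'
termination_by (n, ds.length + 1)
decreasing_by
  · exact Prod.Lex.right _ (by simp)
  · rcases Nat.lt_or_eq_of_le (Nat.min_le_right n₁ n) with h | h
    · exact Prod.Lex.left _ _ h
    · rw [h]; exact Prod.Lex.right _ (by simp)
end

def dfs_load_order (graph : List (String × List String)) (start_package : String) : List String :=
  match pvDfsA graph (pvFuel graph) PySem.Set.empty [] start_package with
  | some (_, _, o) => o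
  | none => []

-- ===== PORT B =====
-- Source B's while-loop over the explicit stack; fuel decremented exactly on expansion pops.
def pvRunB (graph : List (String × List String)) (n : Nat) (stack : List (String × Bool))
    (vis : PySem.Set String) (ord : List String) : Option (List String) :=
  match stack with
  | [] => some ord
  | (p, true) :: rest => pvRunB graph n rest vis (ord ++ [p])
  | (p, false) :: rest =>
    if PySem.Set.contains vis p then pvRunB graph n rest vis ord
    else
      match n with
      | 0 => none
      | Nat.succ m =>
        pvRunB graph m (((pvChildren graph p).map (fun c => (c, false))) ++ (p, true) :: rest)
          (PySem.Set.add vis p) ord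
termination_by (n, stack.length)
decreasing_by
  · exact Prod.Lex.right _ (Nat.lt_succ_self _)
  · exact Prod.Lex.right _ (Nat.lt_succ_self _)
  · exact Prod.Lex.left _ _ (Nat.lt_succ_self _)

def dfs_load_order_alt (graph : List (String × List String)) (start_package : String) : List String :=
  (pvRunB graph (pvFuel graph) [(start_package, false)] PySem.Set.empty []).getD []

-- ===== PRECONDITION & SPEC =====
def Spec_dfs_load_order (graph : List (String × List String)) (start_package : String) (out : List String) : Prop := out = dfs_load_order_alt graph start_package
instance (graph : List (String × List String)) (start_package : String) (out : List String) : Decidable (Spec_dfs_load_order graph start_package out) := by unfold Spec_dfs_load_order; infer_instance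

-- ===== CLAIM (what is proved, stated in full; the proofs are below) =====
def Claim_equal_dfs_load_order : Prop := ∀ (graph : List (String × List String)) (start_package : String), Dom_dfs_load_order graph start_package → Spec_dfs_load_order graph start_package (dfs_load_order graph start_package)

-- ===== LEMMAS AND PROOFS =====

-- the universe of packages ever visitable, and the count of yet-unvisited ones
def pvU (graph : List (String × List String)) (s : String) : List String :=
  PySem.List.dedup (s :: graph.flatMap (fun kv => kv.2))

def pvUnvis (U : List String) (vis : PySem.Set String) : Nat :=
  U.countP (fun x => !(PySem.Set.contains vis x))

lemma pvChildren_subset (graph : List (String × List String)) (p x : String)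
    (hx : x ∈ pvChildren graph p) : x ∈ graph.flatMap (fun kv => kv.2) := by
  unfold pvChildren at hx
  induction graph with
  | nil => simp [PySem.Dict.getD, PySem.Dict.get?] at hx
  | cons kv rest IH =>
    obtain ⟨k, v⟩ := kv
    rw [List.flatMap_cons]
    by_cases hk : (k == p)
    · simp only [PySem.Dict.getD, PySem.Dict.get?_mk_cons, hk, if_pos] at hx
      exact List.mem_append_left _ hx
    · simp only [PySem.Dict.getD, PySem.Dict.get?_mk_cons, hk] at hx
      exact List.mem_append_right _ (IH (by simpa [PySem.Dict.getD] using hx))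

lemma pvUnvisAddLt (U : List String) (vis : PySem.Set String) (p : String)
    (hU : U.Nodup) (hp : p ∈ U) (h : PySem.Set.contains vis p = false) :
    pvUnvis U (PySem.Set.add vis p) < pvUnvis U vis := by
  unfold pvUnvis
  obtain ⟨l₁, l₂, rfl⟩ := List.append_of_mem hp
  have hmono : ∀ (l : List String), l.countP (fun x => !((PySem.Set.add vis p).contains x)) ≤ l.countP (fun x => !(vis.contains x)) := by
    intro l
    apply List.countP_mono_left
    intro x _ hx
    by_contra hc
    rw [Bool.not_eq_true'] at hx
    rw [Bool.not_eq_true, Bool.not_eq_false'] at hc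
    have hx1 : x ∈ PySem.Set.add vis p :=
      (PySem.Set.mem_add vis p x).mpr (Or.inl ((PySem.Set.contains_iff vis x).mp hc))
    rw [(PySem.Set.contains_iff _ x).mpr hx1] at hx
    simp at hx
  have hcp : (PySem.Set.add vis p).contains p = true :=
    (PySem.Set.contains_iff _ p).mpr ((PySem.Set.mem_add vis p p).mpr (Or.inr rfl))
  have h1 := hmono l₁
  have h2 := hmono l₂
  simp only [List.countP_append, List.countP_cons, hcp, h, Bool.not_true, Bool.not_false,
    Bool.false_eq_true, if_false, if_true]
  omega

-- totality statement for pvDfsA at fuel k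
def pvTotStmt (graph : List (String × List String)) (s : String) (k : Nat) : Prop :=
  ∀ vis ord p, p ∈ pvU graph s → pvUnvis (pvU graph s) vis < k →
    ∃ res, pvDfsA graph k vis ord p = some res ∧ res.1 ≤ k ∧
      pvUnvis (pvU graph s) res.2.1 ≤ pvUnvis (pvU graph s) vis ∧
      k - res.1 ≤ pvUnvis (pvU graph s) vis - pvUnvis (pvU graph s) res.2.1

lemma pvTotL (graph : List (String × List String)) (s : String) (N : Nat)
    (HT : ∀ k, k ≤ N → pvTotStmt graph s k) :
    ∀ ds n, n ≤ N → (∀ d ∈ ds, d ∈ pvU graph s) → ∀ vis ord,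
      pvUnvis (pvU graph s) vis < n →
      ∃ res, pvDfsAL graph n vis ord ds = some res ∧ res.1 ≤ n ∧
        pvUnvis (pvU graph s) res.2.1 ≤ pvUnvis (pvU graph s) vis ∧
        n - res.1 ≤ pvUnvis (pvU graph s) vis - pvUnvis (pvU graph s) res.2.1 := by
  intro ds
  induction ds with
  | nil =>
    intro n hn hds vis ord hlt
    exact ⟨(n, vis, ord), by rw [pvDfsAL], le_refl n, le_refl _, by omega⟩
  | cons d ds IH =>
    intro n hn hds vis ord hlt
    obtain ⟨r1, h1, h1le, h1m, h1c⟩ := HT n hn vis ord d (hds d (by simp)) hlt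
    obtain ⟨n₁, v₁, o₁⟩ := r1
    have hlt₁ : pvUnvis (pvU graph s) v₁ < n₁ := by
      simp only at h1le h1m h1c
      omega
    obtain ⟨res, h2, h2le, h2m, h2c⟩ := IH n₁ (le_trans h1le hn)
      (fun d' hd' => hds d' (by simp [hd'])) v₁ o₁ hlt₁
    refine ⟨res, ?_, ?_, ?_, ?_⟩
    · rw [pvDfsAL, h1]
      simpa [Nat.min_eq_left h1le] using h2
    · simp only at h1le h2le; omega
    · simp only at h1m h2m; omega
    · simp only at h1le h1m h1c h2le h2m h2c; omega

lemma pvTot (graph : List (String × List String)) (s : String) :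
    ∀ k, pvTotStmt graph s k := by
  intro k
  induction k using Nat.strong_induction_on with
  | _ k IH =>
    intro vis ord p hp hlt
    by_cases hv : PySem.Set.contains vis p
    · exact ⟨(k, vis, ord), by rw [pvDfsA.eq_def, if_pos hv], le_refl _, le_refl _, by omega⟩
    · cases k with
      | zero => exact absurd hlt (Nat.not_lt_zero _)
      | succ m =>
        have hb : PySem.Set.contains vis p = false := by
          simpa using hv
        have hdec := pvUnvisAddLt (pvU graph s) vis p
          (by simp [pvU, PySem.List.dedup_eq_ofList,
            PySem.Set.nodup_ofList (s :: graph.flatMap (fun kv => kv.2))]) hp hb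
        have hlt' : pvUnvis (pvU graph s) (PySem.Set.add vis p) < m := by omega
        have HT : ∀ j, j ≤ m → pvTotStmt graph s j := fun j hj => IH j (Nat.lt_succ_of_le hj)
        have hchld : ∀ d ∈ pvChildren graph p, d ∈ pvU graph s := by
          intro d hd
          have := pvChildren_subset graph p d hd
          obtain ⟨kv, hkv, hdv⟩ := List.mem_flatMap.mp this
          simp [pvU]
          exact Or.inr ⟨kv.1, kv.2, hkv, hdv⟩
        obtain ⟨res, hL, hLle, hLm, hLc⟩ :=
          pvTotL graph s m HT (pvChildren graph p) m (le_refl m) hchld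
            (PySem.Set.add vis p) ord hlt'
        obtain ⟨n₁, v₁, o₁⟩ := res
        simp only at hLle hLm hLc
        refine ⟨(n₁, v₁, o₁ ++ [p]), ?_, ?_, ?_, ?_⟩
        · rw [pvDfsA.eq_def, if_neg hv]
          simp [hL]
        · show n₁ ≤ m + 1
          omega
        · show pvUnvis (pvU graph s) v₁ ≤ pvUnvis (pvU graph s) vis
          omega
        · show m + 1 - n₁ ≤ pvUnvis (pvU graph s) vis - pvUnvis (pvU graph s) v₁
          omega

-- simulation statement: one pvDfsA call equals a block of pvRunB steps, fuel-exactly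
def pvSimStmt (graph : List (String × List String)) (k : Nat) : Prop :=
  ∀ vis ord p res, pvDfsA graph k vis ord p = some res →
    res.1 ≤ k ∧ ∀ rest, pvRunB graph k ((p, false) :: rest) vis ord =
      pvRunB graph res.1 rest res.2.1 res.2.2

lemma pvSimL (graph : List (String × List String)) (N : Nat)
    (HS : ∀ k, k ≤ N → pvSimStmt graph k) :
    ∀ ds n, n ≤ N → ∀ vis ord res, pvDfsAL graph n vis ord ds = some res →
      res.1 ≤ n ∧ ∀ rest, pvRunB graph n (ds.map (fun c => (c, false)) ++ rest) vis ord =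
        pvRunB graph res.1 rest res.2.1 res.2.2 := by
  intro ds
  induction ds with
  | nil =>
    intro n hn vis ord res h
    rw [pvDfsAL] at h
    cases h
    exact ⟨le_refl _, fun rest => rfl⟩
  | cons d ds IH =>
    intro n hn vis ord res h
    rw [pvDfsAL] at h
    cases hd : pvDfsA graph n vis ord d with
    | none => rw [hd] at h; simp at h
    | some r1 =>
      obtain ⟨n₁, v₁, o₁⟩ := r1
      rw [hd] at h
      simp only at h
      obtain ⟨h1le, h1run⟩ := HS n hn vis ord d (n₁, v₁, o₁) hd
      simp only at h1le
      rw [Nat.min_eq_left h1le] at h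
      obtain ⟨h2le, h2run⟩ := IH n₁ (le_trans h1le hn) v₁ o₁ res h
      refine ⟨le_trans h2le h1le, fun rest => ?_⟩
      rw [List.map_cons, List.cons_append]
      rw [h1run (ds.map (fun c => (c, false)) ++ rest)]
      exact h2run rest

lemma pvSim (graph : List (String × List String)) : ∀ k, pvSimStmt graph k := by
  intro k
  induction k using Nat.strong_induction_on with
  | _ k IH =>
    intro vis ord p res h
    rw [pvDfsA.eq_def] at h
    by_cases hv : PySem.Set.contains vis p
    · rw [if_pos hv] at h
      cases h
      refine ⟨le_refl _, fun rest => ?_⟩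
      rw [pvRunB.eq_def]
      simp only [hv]
      simp
    · rw [if_neg hv] at h
      cases k with
      | zero => simp at h
      | succ m =>
        simp only at h
        cases hL : pvDfsAL graph m (PySem.Set.add vis p) ord (pvChildren graph p) with
        | none => rw [hL] at h; simp at h
        | some r =>
          obtain ⟨n₁, v₁, o₁⟩ := r
          rw [hL] at h
          simp only [Option.some.injEq] at h
          subst h
          have HS : ∀ j, j ≤ m → pvSimStmt graph j := fun j hj => IH j (Nat.lt_succ_of_le hj)
          obtain ⟨hle, hrun⟩ :=
            pvSimL graph m HS (pvChildren graph p) m (le_refl m) (PySem.Set.add vis p) ord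
              (n₁, v₁, o₁) hL
          simp only at hle
          have hb : PySem.Set.contains vis p = false := by simpa using hv
          refine ⟨Nat.le_succ_of_le hle, fun rest => ?_⟩
          rw [pvRunB.eq_def]
          simp only [hb, Bool.false_eq_true, if_false]
          rw [hrun ((p, true) :: rest)]
          rw [pvRunB.eq_def]

-- ===== VERDICT (by name: the statement is the Claim_ definition above) =====
theorem dfs_load_order_spec : Claim_equal_dfs_load_order := by
  intro graph s _
  unfold Spec_dfs_load_order dfs_load_order dfs_load_order_alt
  have hs : s ∈ pvU graph s := by
    simp [pvU]
  have hlt : pvUnvis (pvU graph s) PySem.Set.empty < pvFuel graph := by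
    have h1 : pvUnvis (pvU graph s) PySem.Set.empty ≤ (pvU graph s).length :=
      List.countP_le_length
    have h2 : (pvU graph s).length ≤ (graph.flatMap (fun kv => kv.2)).length + 1 := by
      have := PySem.Set.length_ofList_le (s :: graph.flatMap (fun kv => kv.2))
      simpa [pvU, PySem.List.dedup_eq_ofList] using this
    unfold pvFuel; omega
  obtain ⟨res, hA, hle, -, -⟩ := pvTot graph s (pvFuel graph) PySem.Set.empty [] s hs hlt
  obtain ⟨n', v, o⟩ := res
  obtain ⟨-, hrun⟩ := pvSim graph (pvFuel graph) PySem.Set.empty [] s (n', v, o) hA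
  have hB : pvRunB graph (pvFuel graph) [(s, false)] PySem.Set.empty [] = some o := by
    rw [hrun []]
    simp [pvRunB]
  rw [hA, hB]
  rfl
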